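-- pv_equiv track=rewrite | github.com/growgraph/GraFlo | graph_cast/plot/plotter.py | lto_dict
-- ===== SOURCE A (Python) =====
-- def lto_dict(strings):
--     strings = list(set(strings))
--     d = {"": strings}
--     while any([len(v) > 1 for v in d.values()]):
--         keys = list(d.keys())
--         for k in keys:
--             item = d.pop(k)
--             if len(item) < 2:
--                 d[k] = item
--             else:
--                 for s in item:
--                     if s:
--                         if k + s[0] in d:
--                             d[k + s[0]].append(s[1:])
--                         else:
--                             d[k + s[0]] = [s[1:]]
--                     else:
--                         d[k] = [s]
--     r = {}
--     for k, v in d.items():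
--         if v:
--             r[k] = v[0]
--     return r
-- ===== SOURCE B (Python) =====
-- def lto_dict(strings):
--     # Build the distinguishing-prefix map in one recursive trie-style pass:
--     # group the (deduplicated) strings by first character and recurse on each
--     # group, instead of A's repeated whole-dict rebuild rounds.
--     def expand(k, items):
--         if len(items) < 2:
--             return [(k, s) for s in items]
--         groups = {}
--         for s in items:
--             if s:
--                 groups.setdefault(k + s[0], []).append(s[1:])
--             else:
--                 groups[k] = [""]
--         return [p for kk, vv in groups.items() for p in expand(kk, vv)]
--
--     return dict(expand("", list(dict.fromkeys(strings))))
-- ===== Notes on version B (the rewrite author's own statement) =====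
-- stated objective: alternative
-- what changed: B computes the distinguishing-prefix map in one recursive trie-style pass (deduplicate once, group by first character, recurse per group), instead of A's while-loop that repeatedly pops every key and rebuilds the whole dict round by round until all groups are singletons.
import Mathlib
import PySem

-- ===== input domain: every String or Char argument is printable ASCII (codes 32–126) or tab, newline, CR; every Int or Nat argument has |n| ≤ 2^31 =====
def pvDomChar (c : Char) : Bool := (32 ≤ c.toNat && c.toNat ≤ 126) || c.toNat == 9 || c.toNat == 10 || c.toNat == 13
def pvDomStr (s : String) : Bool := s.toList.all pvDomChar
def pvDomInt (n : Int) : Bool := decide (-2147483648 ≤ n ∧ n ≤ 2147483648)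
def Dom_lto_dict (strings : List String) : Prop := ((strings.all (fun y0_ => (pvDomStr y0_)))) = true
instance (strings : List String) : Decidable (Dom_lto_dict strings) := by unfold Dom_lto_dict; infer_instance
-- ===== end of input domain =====

set_option maxHeartbeats 1000000

-- B replaces A's round-by-round whole-dict rebuild by one recursive first-character
-- grouping pass (objective: alternative, same cost).  Equivalence is about the return value; the ports
-- read Python's set/dict iteration order as first-insertion order, and Python compares
-- the returned dicts order-insensitively.
-- Python's s[0], s[1:], k + s[0] and `if s:` are ported by hand through the character
-- list (String.toList/String.ofList), which is exact for Python str.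

abbrev pvD := PySem.Dict String (List String)

def pvPush (k : String) (c : Char) : String := String.ofList (k.toList ++ [c])  -- k + s[0]
def pvTail (s : String) : String := String.ofList s.toList.tail                 -- s[1:]
def pvW (s : String) : Nat := s.toList.length + 1
def pvWD (l : List (String × List String)) : Nat := (l.map (fun p => (p.2.map pvW).sum)).sum

-- ===== PORT A =====
-- the inner `for s in item:` body
def ltoStep (k : String) (dd : pvD) (s : String) : pvD :=
  match s.toList with
  | c :: _ =>                                   -- if s:
      if dd.contains (pvPush k c) then          --   if k + s[0] in d:
        dd.modify (pvPush k c) [] (fun w => w ++ [pvTail s])  -- d[k+s[0]].append(s[1:])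
      else dd.insert (pvPush k c) [pvTail s]    --   else: d[k+s[0]] = [s[1:]]
  | [] => dd.insert k [s]                       -- else: d[k] = [s]

-- the `for k in keys:` body
def ltoBody (d : pvD) (k : String) : pvD :=
  match d.pop? k with
  | none => d                                   -- unreachable: every snapshot key is present when popped
  | some (item, d1) =>
      if item.length < 2 then d1.insert k item
      else item.foldl (ltoStep k) d1

-- one iteration of the while loop (keys = list(d.keys()) snapshot)
def ltoRound (d : pvD) : pvD := d.keys.foldl ltoBody d

-- the while loop; the fuel only makes it total, pvWD d.items + 1 is proved sufficient below
def ltoLoop : Nat → pvD → pvD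
  | 0, d => d
  | n+1, d => if d.values.any (fun v => decide (1 < v.length)) then ltoLoop n (ltoRound d) else d

def lto_dict (strings : List String) : List (String × String) :=
  let s1 : List String := PySem.Set.ofList strings          -- strings = list(set(strings))
  let d0 : pvD := PySem.Dict.empty.insert "" s1             -- d = {"": strings}
  let d := ltoLoop (pvWD d0.items + 1) d0                   -- while any([len(v) > 1 ...]): ...
  (d.items.foldl (fun r p =>                                -- for k, v in d.items():
      match p.2 with
      | [] => r                                             --   (skip if not v)
      | s :: _ => r.insert p.1 s)                           --   r[k] = v[0]
    (PySem.Dict.empty : PySem.Dict String String)).items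

-- ===== PORT B =====
-- the grouping-loop body of Source B
def ltoGStep (k : String) (g : pvD) (s : String) : pvD :=
  match s.toList with
  | c :: _ => g.modify (pvPush k c) [] (fun w => w ++ [pvTail s])  -- groups.setdefault(k+s[0], []).append(s[1:])
  | [] => g.insert k [""]                                          -- groups[k] = [""]

def ltoGroups (k : String) (items : List String) : pvD :=
  items.foldl (ltoGStep k) PySem.Dict.empty

-- expand(k, items); the fuel only makes the recursion total, (items.map pvW).sum + 1 is sufficient
def ltoExpand : Nat → String → List String → List (String × String)
  | 0, _, _ => []
  | n+1, k, items =>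
      if items.length < 2 then items.map (fun s => (k, s))
      else (ltoGroups k items).items.flatMap (fun p => ltoExpand n p.1 p.2)

def lto_dict_alt (strings : List String) : List (String × String) :=
  let items := PySem.List.dedup strings                     -- list(dict.fromkeys(strings))
  (PySem.Dict.ofList (ltoExpand ((items.map pvW).sum + 1) "" items)).items  -- dict(expand("", ...))

-- ===== PRECONDITION & SPEC =====
def Spec_lto_dict (strings : List String) (out : List (String × String)) : Prop := out = lto_dict_alt strings
instance (strings : List String) (out : List (String × String)) : Decidable (Spec_lto_dict strings out) := by unfold Spec_lto_dict; infer_instance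

-- ===== CLAIM (what is proved, stated in full; the proofs are below) =====
def Claim_equal_lto_dict : Prop := ∀ (strings : List String), Dom_lto_dict strings → Spec_lto_dict strings (lto_dict strings)

-- ===== LEMMAS AND PROOFS =====

-- proof-side notions: the key a string is routed to, the one-round step of an entry,
-- a fueled (key, value-list) expansion, and leaf extraction
def pvKey (k : String) (s : String) : String :=
  match s.toList with | [] => k | c :: _ => pvPush k c

def pvStepL (p : String × List String) : List (String × List String) :=
  if p.2.length < 2 then [p] else (ltoGroups p.1 p.2).items

def pvEL : Nat → (String × List String) → List (String × List String)
  | 0, _ => []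
  | n+1, p =>
      if p.2.length < 2 then [p]
      else (ltoGroups p.1 p.2).items.flatMap (pvEL n)

def pvExt (p : String × List String) : Option (String × String) :=
  match p.2 with | [] => none | s :: _ => some (p.1, s)

def pvInv (d : pvD) (L : Nat) : Prop :=
  d.keys.Nodup ∧ (∀ p ∈ d.items, p.2.Nodup) ∧
  (∀ p ∈ d.items, p.1.toList.length ≤ L) ∧
  (∀ p ∈ d.items, 2 ≤ p.2.length → p.1.toList.length = L)

def pvWI (s : String) : Nat := if s.toList.isEmpty then 1 else s.toList.length

-- ---- generic list helpers ----
theorem pv_flatMap_congr {α β : Type} (l : List α) (f g : α → List β)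
    (h : ∀ x ∈ l, f x = g x) : l.flatMap f = l.flatMap g := by
  induction l with
  | nil => rfl
  | cons x t ih =>
      simp only [List.flatMap_cons]
      rw [h x (by simp), ih (fun y hy => h y (by simp [hy]))]

theorem pvWD_cons (p : String × List String) (t : List (String × List String)) :
    pvWD (p :: t) = (p.2.map pvW).sum + pvWD t := by simp [pvWD]

theorem pvWD_append (l1 l2 : List (String × List String)) :
    pvWD (l1 ++ l2) = pvWD l1 + pvWD l2 := by simp [pvWD]

theorem pvWD_flatMap (l : List (String × List String))
    (f : String × List String → List (String × List String)) :
    pvWD (l.flatMap f) = (l.map (fun x => pvWD (f x))).sum := by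
  induction l with
  | nil => rfl
  | cons x t ih => simp only [List.flatMap_cons, pvWD_append, List.map_cons, List.sum_cons, ih]

theorem pv_len_le_sum (v : List String) : v.length ≤ (v.map pvW).sum := by
  induction v with
  | nil => simp
  | cons s t ih => simp only [List.length_cons, List.map_cons, List.sum_cons, pvW]; omega

theorem pvWI_le (s : String) : pvWI s ≤ pvW s := by
  unfold pvWI pvW; split <;> omega

-- ---- small string facts ----
theorem pvPush_toList (k : String) (c : Char) : (pvPush k c).toList = k.toList ++ [c] := by
  simp [pvPush]

theorem pvPush_len (k : String) (c : Char) : (pvPush k c).toList.length = k.toList.length + 1 := by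
  simp [pvPush_toList]

theorem pvPush_ne_short (k k' : String) (c : Char) (h : k'.toList.length ≤ k.toList.length) :
    pvPush k c ≠ k' := by
  intro he
  have := pvPush_len k c
  rw [he] at this
  omega

theorem pvPush_inj (k k' : String) (c c' : Char)
    (hlen : k.toList.length = k'.toList.length) (h : pvPush k c = pvPush k' c') :
    k = k' ∧ c = c' := by
  have h2 : k.toList ++ [c] = k'.toList ++ [c'] := by
    have := congrArg String.toList h
    simpa [pvPush_toList] using this
  have h3 := List.append_inj h2 hlen
  refine ⟨String.toList_inj.mp h3.1, ?_⟩
  simpa using h3.2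

theorem pvTail_inj_on (a b : String) (c : Char)
    (ha : a.toList.head? = some c) (hb : b.toList.head? = some c) (h : pvTail a = pvTail b) :
    a = b := by
  cases ha2 : a.toList with
  | nil => rw [ha2] at ha; simp at ha
  | cons c1 t1 =>
      cases hb2 : b.toList with
      | nil => rw [hb2] at hb; simp at hb
      | cons c2 t2 =>
          rw [ha2] at ha; rw [hb2] at hb
          simp only [List.head?_cons, Option.some.injEq] at ha hb
          have h3 : t1 = t2 := by
            have := congrArg String.toList h
            simpa [pvTail, ha2, hb2] using this
          apply String.toList_inj.mp
          rw [ha2, hb2, ha, hb, h3]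

-- ---- Dict internals on append-structured item lists ----
theorem pv_beq_list_false {ν : Type} (l : List (String × ν)) (x : String)
    (h : ∀ p ∈ l, p.1 ≠ x) : (l.any (fun p => p.1 == x)) = false := by
  simp only [List.any_eq_false]
  intro p hp
  simp [h p hp]

theorem pv_insert_fresh {ν : Type} (l : List (String × ν)) (x : String) (v : ν)
    (h : ∀ p ∈ l, p.1 ≠ x) :
    (PySem.Dict.mk l).insert x v = PySem.Dict.mk (l ++ [(x, v)]) := by
  simp [PySem.Dict.insert, PySem.Dict.contains, pv_beq_list_false l x h]

theorem pv_get?_append_left {ν : Type} (e g : List (String × ν)) (x : String)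
    (hx : ∀ p ∈ e, p.1 ≠ x) :
    (PySem.Dict.mk (e ++ g)).get? x = (PySem.Dict.mk g).get? x := by
  induction e with
  | nil => rfl
  | cons p e' ih =>
      obtain ⟨p1, p2⟩ := p
      have hp : p1 ≠ x := hx (p1, p2) (by simp)
      rw [List.cons_append, PySem.Dict.get?_mk_cons, if_neg (by simp [hp])]
      exact ih (fun q hq => hx q (List.mem_cons_of_mem _ hq))

theorem pv_insert_append {ν : Type} (e g : List (String × ν)) (x : String) (v : ν)
    (hx : ∀ p ∈ e, p.1 ≠ x) :
    (PySem.Dict.mk (e ++ g)).insert x v = PySem.Dict.mk (e ++ ((PySem.Dict.mk g).insert x v).items) := by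
  have he : (e.any (fun p => p.1 == x)) = false := pv_beq_list_false e x hx
  have hmape : e.map (fun p => if p.1 == x then (x, v) else p) = e := by
    have h1 : ∀ p ∈ e, (fun p : String × ν => if p.1 == x then (x, v) else p) p = id p := by
      intro p hp; simp [hx p hp]
    rw [List.map_congr_left h1, List.map_id]
  simp only [PySem.Dict.insert, PySem.Dict.contains, PySem.Dict.items, List.any_append, he,
    Bool.false_or]
  by_cases hc : (g.any (fun p => p.1 == x)) = true
  · rw [if_pos hc, if_pos hc, List.map_append, hmape]
  · rw [if_neg hc, if_neg hc, List.append_assoc]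

theorem pv_gstep_append (e g : List (String × List String)) (k s : String)
    (hx : ∀ p ∈ e, p.1 ≠ pvKey k s) :
    ltoGStep k (PySem.Dict.mk (e ++ g)) s = PySem.Dict.mk (e ++ (ltoGStep k (PySem.Dict.mk g) s).items) := by
  cases hs : s.toList with
  | nil =>
      have hk : ∀ p ∈ e, p.1 ≠ k := by
        intro p hp; have := hx p hp; simpa [pvKey, hs] using this
      simp only [ltoGStep, hs]
      exact pv_insert_append e g k [""] hk
  | cons c t =>
      have hk : ∀ p ∈ e, p.1 ≠ pvPush k c := by
        intro p hp; have := hx p hp; simpa [pvKey, hs] using this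
      simp only [ltoGStep, hs, PySem.Dict.modify, PySem.Dict.getD]
      rw [pv_get?_append_left e g _ hk]
      exact pv_insert_append e g _ _ hk

theorem pv_gfold_append (v : List String) (e g : List (String × List String)) (k : String)
    (h : ∀ s ∈ v, ∀ p ∈ e, p.1 ≠ pvKey k s) :
    v.foldl (ltoGStep k) (PySem.Dict.mk (e ++ g)) =
      PySem.Dict.mk (e ++ (v.foldl (ltoGStep k) (PySem.Dict.mk g)).items) := by
  induction v generalizing g with
  | nil => rfl
  | cons s v' ih =>
      simp only [List.foldl_cons]
      rw [pv_gstep_append e g k s (fun p hp => h s (by simp) p hp)]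
      rw [ih ((ltoGStep k (PySem.Dict.mk g) s).items) (fun s' hs' p hp => h s' (by simp [hs']) p hp)]

theorem ltoStep_eq (k : String) (dd : pvD) (s : String) : ltoStep k dd s = ltoGStep k dd s := by
  cases hs : s.toList with
  | nil =>
      have h0 : s = "" := String.toList_eq_nil_iff.mp hs
      subst h0
      simp [ltoStep, ltoGStep]
  | cons c t =>
      simp only [ltoStep, ltoGStep, hs, PySem.Dict.modify]
      by_cases hc : dd.contains (pvPush k c) = true
      · simp [hc]
      · have hg : dd.getD (pvPush k c) [] = [] :=
          PySem.Dict.getD_of_not_contains dd [] (by simpa using hc)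
        simp [hc, hg]

theorem ltoStep_foldl_eq (k : String) (d1 : pvD) (item : List String) :
    item.foldl (ltoStep k) d1 = item.foldl (ltoGStep k) d1 := by
  have h : ltoStep k = ltoGStep k := funext fun dd => funext fun s => ltoStep_eq k dd s
  rw [h]

-- ---- characterisation of the grouping fold ----
theorem pv_keys_eq {ν : Type} (d : PySem.Dict String ν) : d.keys = d.items.map Prod.fst := rfl

theorem pv_mem_keys_gstep (k : String) (g : pvD) (s x : String) :
    x ∈ (ltoGStep k g s).keys ↔ x = pvKey k s ∨ x ∈ g.keys := by
  cases hs : s.toList with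
  | nil => simp only [ltoGStep, hs, pvKey]; exact PySem.Dict.mem_keys_insert g k x [""]
  | cons c t =>
      simp only [ltoGStep, hs, pvKey, PySem.Dict.modify]
      exact PySem.Dict.mem_keys_insert g _ x _

theorem pv_nodup_keys_gstep (k : String) (g : pvD) (s : String) (h : g.keys.Nodup) :
    (ltoGStep k g s).keys.Nodup := by
  cases hs : s.toList with
  | nil => simp only [ltoGStep, hs]; exact PySem.Dict.nodup_keys_insert g _ _ h
  | cons c t =>
      simp only [ltoGStep, hs, PySem.Dict.modify]
      exact PySem.Dict.nodup_keys_insert g _ _ h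

theorem pv_mem_keys_gfold (k : String) (v : List String) (g : pvD) (x : String) :
    x ∈ (v.foldl (ltoGStep k) g).keys ↔ x ∈ g.keys ∨ x ∈ v.map (pvKey k) := by
  induction v generalizing g with
  | nil => simp
  | cons s v' ih =>
      rw [List.foldl_cons, ih, pv_mem_keys_gstep]
      simp only [List.map_cons, List.mem_cons]
      tauto

theorem pv_nodup_keys_gfold (k : String) (v : List String) (g : pvD) (h : g.keys.Nodup) :
    (v.foldl (ltoGStep k) g).keys.Nodup := by
  induction v generalizing g with
  | nil => exact h
  | cons s v' ih => exact ih _ (pv_nodup_keys_gstep k g s h)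

theorem pv_getD_gfold_push (k : String) (v : List String) (g : pvD) (c : Char) :
    (v.foldl (ltoGStep k) g).getD (pvPush k c) [] =
      g.getD (pvPush k c) [] ++ (v.filter (fun s => s.toList.head? == some c)).map pvTail := by
  induction v generalizing g with
  | nil => simp
  | cons s v' ih =>
      rw [List.foldl_cons, ih]
      cases hs : s.toList with
      | nil =>
          have hne : pvPush k c ≠ k := pvPush_ne_short k k c le_rfl
          simp only [ltoGStep, hs]
          rw [PySem.Dict.getD_insert_of_ne g [""] [] hne]
          have hf : (s.toList.head? == some c) = false := by simp [hs]
          simp [List.filter_cons, hf]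
      | cons c' t =>
          by_cases hcc : c' = c
          · subst hcc
            simp only [ltoGStep, hs, PySem.Dict.modify]
            rw [PySem.Dict.getD_insert_self]
            have hf : (s.toList.head? == some c') = true := by simp [hs]
            simp [List.filter_cons, hf, List.append_assoc]
          · simp only [ltoGStep, hs, PySem.Dict.modify]
            have hne : pvPush k c ≠ pvPush k c' := by
              intro he
              exact hcc ((pvPush_inj k k c c' rfl he).2.symm)
            rw [PySem.Dict.getD_insert_of_ne _ _ [] hne]
            have hf : (s.toList.head? == some c) = false := by
              simp only [hs, List.head?_cons, beq_eq_false_iff_ne, ne_eq, Option.some.injEq]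
              exact hcc
            simp [hf]

theorem pv_getD_gfold_k (k : String) (v : List String) (g : pvD) :
    (v.foldl (ltoGStep k) g).getD k [] =
      if v.any (fun s => s.toList.isEmpty) then [""] else g.getD k [] := by
  induction v generalizing g with
  | nil => simp
  | cons s v' ih =>
      rw [List.foldl_cons, ih]
      cases hs : s.toList with
      | nil =>
          simp only [ltoGStep, hs]
          rw [PySem.Dict.getD_insert_self]
          have : (s.toList.isEmpty) = true := by simp [hs]
          simp [List.any_cons, this]
      | cons c t =>
          simp only [ltoGStep, hs, PySem.Dict.modify]
          have hne : k ≠ pvPush k c := Ne.symm (pvPush_ne_short k k c le_rfl)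
          rw [PySem.Dict.getD_insert_of_ne _ _ [] hne]
          have : (s.toList.isEmpty) = false := by simp [hs]
          simp [List.any_cons, this]

theorem pv_mem_groups (k : String) (v : List String) (p : String × List String)
    (hp : p ∈ (ltoGroups k v).items) :
    (p.1 = k ∧ p.2 = [""]) ∨
    (∃ c, p.1 = pvPush k c ∧
          p.2 = (v.filter (fun s => s.toList.head? == some c)).map pvTail ∧ p.2 ≠ []) := by
  have hnd : (ltoGroups k v).keys.Nodup :=
    pv_nodup_keys_gfold k v PySem.Dict.empty PySem.Dict.nodup_keys_empty
  have hget : (ltoGroups k v).getD p.1 [] = p.2 := by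
    have := PySem.Dict.getD_of_mem_items (ltoGroups k v) (k := p.1) (v := p.2) (by simpa using hp) hnd []
    exact this
  have hkey : p.1 ∈ (ltoGroups k v).keys := PySem.Dict.mem_keys_of_mem_items _ hp
  rw [ltoGroups, pv_mem_keys_gfold] at hkey
  rcases hkey with h0 | hmem
  · rw [PySem.Dict.keys_empty] at h0; simp at h0
  · obtain ⟨s0, hs0v, hs0⟩ := List.mem_map.mp hmem
    cases hs : s0.toList with
    | nil =>
        have hp1 : p.1 = k := by rw [← hs0]; simp [pvKey, hs]
        left
        refine ⟨hp1, ?_⟩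
        rw [← hget, hp1, ltoGroups, pv_getD_gfold_k]
        have hany : v.any (fun s => s.toList.isEmpty) = true :=
          List.any_eq_true.mpr ⟨s0, hs0v, by simp [hs]⟩
        simp [hany]
    | cons c t =>
        have hp1 : p.1 = pvPush k c := by rw [← hs0]; simp [pvKey, hs]
        right
        refine ⟨c, hp1, ?_, ?_⟩
        · rw [← hget, hp1, ltoGroups, pv_getD_gfold_push]
          simp
        · rw [← hget, hp1, ltoGroups, pv_getD_gfold_push]
          have : s0 ∈ v.filter (fun s => s.toList.head? == some c) :=
            List.mem_filter.mpr ⟨hs0v, by simp [hs]⟩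
          simp only [PySem.Dict.getD_empty, List.nil_append]
          exact fun he => (List.ne_nil_of_mem (List.mem_map_of_mem (f := pvTail) this)) he

-- ---- weights ----
theorem pv_wd_insert (g : pvD) (h : g.keys.Nodup) (x : String) (w : List String) :
    pvWD (g.insert x w).items + ((g.getD x []).map pvW).sum = pvWD g.items + (w.map pvW).sum := by
  obtain ⟨l⟩ := g
  induction l with
  | nil =>
      simp [PySem.Dict.insert, PySem.Dict.contains, PySem.Dict.getD, PySem.Dict.get?, pvWD]
  | cons a t ih =>
      have hkeys : (a.1 :: t.map Prod.fst).Nodup := by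
        simpa [pv_keys_eq] using h
      have hax : a.1 ∉ t.map Prod.fst := (List.nodup_cons.mp hkeys).1
      have hnt : (PySem.Dict.mk t : pvD).keys.Nodup := by
        simpa [pv_keys_eq] using (List.nodup_cons.mp hkeys).2
      by_cases hx1 : a.1 = x
      · have hta : ∀ p ∈ t, (p.1 == x) = false := by
          intro p hp
          have : p.1 ≠ x := by
            intro he
            exact hax (by rw [← hx1] at he; exact he ▸ List.mem_map_of_mem (f := Prod.fst) hp)
          simp [this]
        have hcon : ((a :: t).any (fun p => p.1 == x)) = true := by simp [hx1]
        have hmap : t.map (fun p => if p.1 == x then (x, w) else p) = t := by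
          have h1 : ∀ p ∈ t, (fun p : String × List String => if p.1 == x then (x, w) else p) p = id p := by
            intro p hp; simp [hta p hp]
          rw [List.map_congr_left h1, List.map_id]
        simp only [PySem.Dict.insert, PySem.Dict.contains, PySem.Dict.items, hcon, if_true,
          PySem.Dict.getD, PySem.Dict.get?, List.map_cons, hx1, hmap]
        rw [List.find?_cons_of_pos (by simp [hx1])]
        simp only [Option.map_some, Option.getD_some, if_pos (by simp [hx1] : (a.1 == x) = true)]
        rw [pvWD_cons, pvWD_cons]
        simp only [beq_self_eq_true, if_true]
        omega
      · have hcx : ((a :: t).any (fun p => p.1 == x)) = (t.any (fun p => p.1 == x)) := by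
          simp [List.any_cons, hx1]
        have hgd : (PySem.Dict.mk (a :: t) : pvD).getD x [] = (PySem.Dict.mk t : pvD).getD x [] := by
          simp only [PySem.Dict.getD, PySem.Dict.get?, PySem.Dict.items]
          rw [List.find?_cons_of_neg (by simp [hx1])]
        have ihx := ih hnt
        cases hct : (t.any (fun p => p.1 == x)) with
        | false =>
            simp only [PySem.Dict.insert, PySem.Dict.contains, PySem.Dict.items, hcx, hct,
              Bool.false_eq_true, if_false, hgd] at ihx ⊢
            rw [List.cons_append, pvWD_cons, pvWD_cons]
            omega
        | true =>
            simp only [PySem.Dict.insert, PySem.Dict.contains, PySem.Dict.items, hcx, hct,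
              if_true, hgd] at ihx ⊢
            rw [List.map_cons, pvWD_cons, pvWD_cons, if_neg (by simp [hx1])]
            omega

theorem pv_wd_gstep_le (g : pvD) (k s : String) (h : g.keys.Nodup) :
    pvWD (ltoGStep k g s).items ≤ pvWD g.items + pvWI s := by
  cases hs : s.toList with
  | nil =>
      simp only [ltoGStep, hs]
      have h0 := pv_wd_insert g h k [""]
      have h1 : ((([""] : List String)).map pvW).sum = 1 := by simp [pvW]
      rw [h1] at h0
      have hwi : pvWI s = 1 := by simp [pvWI, hs]
      rw [hwi]
      omega
  | cons c t =>
      simp only [ltoGStep, hs, PySem.Dict.modify]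
      have := pv_wd_insert g h (pvPush k c) (g.getD (pvPush k c) [] ++ [pvTail s])
      have hwi : pvWI s = t.length + 1 := by simp [pvWI, hs]
      have hwt : pvW (pvTail s) = t.length + 1 := by simp [pvW, pvTail, hs]
      rw [List.map_append, List.sum_append] at this
      simp only [List.map_cons, List.map_nil, List.sum_cons, List.sum_nil, hwt] at this
      omega

theorem pv_wd_gfold_le (k : String) (v : List String) (g : pvD) (h : g.keys.Nodup) :
    pvWD (v.foldl (ltoGStep k) g).items ≤ pvWD g.items + (v.map pvWI).sum := by
  induction v generalizing g with
  | nil => simp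
  | cons s v' ih =>
      rw [List.foldl_cons]
      have h1 := ih (ltoGStep k g s) (pv_nodup_keys_gstep k g s h)
      have h2 := pv_wd_gstep_le g k s h
      simp only [List.map_cons, List.sum_cons]
      omega

theorem pv_wI_lt (v : List String) (hnd : v.Nodup) (h2 : 2 ≤ v.length) :
    (v.map pvWI).sum < (v.map pvW).sum := by
  obtain ⟨s0, hs0, hne⟩ : ∃ s ∈ v, s.toList.isEmpty = false := by
    match v, hnd, h2 with
    | a :: b :: t, hnd, _ =>
      by_cases ha : a.toList.isEmpty = true
      · by_cases hb : b.toList.isEmpty = true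
        · exfalso
          have ha' : a = "" := String.toList_eq_nil_iff.mp (by simpa using ha)
          have hb' : b = "" := String.toList_eq_nil_iff.mp (by simpa using hb)
          have : a ≠ b := by
            have := List.nodup_cons.mp hnd
            exact fun he => this.1 (he ▸ List.mem_cons_self)
          exact this (ha'.trans hb'.symm)
        · exact ⟨b, by simp, by simpa using hb⟩
      · exact ⟨a, by simp, by simpa using ha⟩
  refine List.sum_lt_sum pvWI pvW (fun s _ => pvWI_le s) ⟨s0, hs0, ?_⟩
  simp only [pvWI, pvW, hne, Bool.false_eq_true, if_false]
  omega

theorem pv_group_w_lt (k : String) (v : List String) (p : String × List String)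
    (h2 : 2 ≤ v.length) (hp : p ∈ (ltoGroups k v).items) :
    (p.2.map pvW).sum < (v.map pvW).sum := by
  rcases pv_mem_groups k v p hp with ⟨_, hval⟩ | ⟨c, _, hval, _⟩
  · rw [hval]
    have := pv_len_le_sum v
    simp only [List.map_cons, List.map_nil, List.sum_cons, List.sum_nil]
    have h1 : pvW "" = 1 := by simp [pvW]
    rw [h1]; omega
  · rw [hval, List.map_map]
    have hcong : (v.filter (fun s => s.toList.head? == some c)).map (pvW ∘ pvTail) =
        (v.filter (fun s => s.toList.head? == some c)).map (fun s => s.toList.length) := by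
      apply List.map_congr_left
      intro s hs
      have hpred := (List.mem_filter.mp hs).2
      cases hsl : s.toList with
      | nil => rw [hsl] at hpred; simp at hpred
      | cons c0 t0 => simp [pvW, pvTail, hsl]
    rw [hcong]
    have h1 : ((v.filter (fun s => s.toList.head? == some c)).map (fun s => s.toList.length)).sum ≤
        (v.map (fun s => s.toList.length)).sum := by
      apply List.Sublist.sum_le_sum
      · exact List.filter_sublist.map _
      · intro a _; exact Nat.zero_le a
    have h3 : (v.map (fun s => s.toList.length)).sum < (v.map pvW).sum := by
      apply List.sum_lt_sum _ _ (fun s _ => by simp [pvW])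
      match v, h2 with
      | a :: t, _ => exact ⟨a, by simp, by simp [pvW]⟩
    omega

-- ---- one round is a flat map over the entries ----
theorem pv_stepL_cases (p q : String × List String) (hq : q ∈ pvStepL p) :
    (q = p ∧ p.2.length < 2) ∨
    (2 ≤ p.2.length ∧ ((q.1 = p.1 ∧ q.2 = [""]) ∨
      ∃ c, q.1 = pvPush p.1 c ∧
           q.2 = (p.2.filter (fun s => s.toList.head? == some c)).map pvTail ∧ q.2 ≠ [])) := by
  unfold pvStepL at hq
  by_cases hl : p.2.length < 2
  · left; rw [if_pos hl] at hq; simp at hq; exact ⟨hq, hl⟩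
  · right; rw [if_neg hl] at hq
    exact ⟨by omega, pv_mem_groups p.1 p.2 q hq⟩

theorem pv_round_go (L : Nat) (K₀ : List String) (hK : ∀ x ∈ K₀, x.toList.length ≤ L) :
    ∀ (rest : List (String × List String)), ∀ (done : List (String × List String)),
    (rest.map Prod.fst).Nodup →
    (∀ p ∈ rest, p.1 ∈ K₀) →
    (∀ p ∈ rest, 2 ≤ p.2.length → p.1.toList.length = L) →
    (∀ x ∈ done.map Prod.fst,
        (x ∈ K₀ ∧ x ∉ rest.map Prod.fst) ∨
        (∃ k0 c, k0 ∈ K₀ ∧ k0 ∉ rest.map Prod.fst ∧ k0.toList.length = L ∧ x = pvPush k0 c)) →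
    (rest.map Prod.fst).foldl ltoBody (PySem.Dict.mk (rest ++ done)) =
      PySem.Dict.mk (done ++ rest.flatMap pvStepL) := by
  intro rest
  induction rest with
  | nil => intro done _ _ _ _; simp
  | cons hd rest' ih =>
      obtain ⟨k, v⟩ := hd
      intro done h1 h2 h3 h4
      have hk0 : k ∈ K₀ := h2 (k, v) (by simp)
      have hkL : k.toList.length ≤ L := hK k hk0
      have h1' := List.nodup_cons.mp (by simpa only [List.map_cons] using h1)
      have hknr : k ∉ rest'.map Prod.fst := h1'.1
      have hdk : ∀ p ∈ done, p.1 ≠ k := by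
        intro p hp he
        rcases h4 p.1 (List.mem_map_of_mem hp) with ⟨_, hnr⟩ | ⟨k0, c, _, _, hk0L, hpe⟩
        · exact hnr (by simp [he])
        · rw [hpe] at he
          exact pvPush_ne_short k0 k c (by omega) he
      have hrk : ∀ p ∈ rest', p.1 ≠ k := by
        intro p hp he
        exact hknr (he ▸ List.mem_map_of_mem hp)
      have hfreshk : ∀ p ∈ rest' ++ done, p.1 ≠ k := by
        intro p hp
        rcases List.mem_append.mp hp with h | h
        · exact hrk p h
        · exact hdk p h
      -- compute the body
      have hget : (PySem.Dict.mk ((k, v) :: (rest' ++ done))).get? k = some v := by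
        rw [PySem.Dict.get?_mk_cons, if_pos (by simp)]
      have herase : (PySem.Dict.mk ((k, v) :: (rest' ++ done))).erase k =
          PySem.Dict.mk (rest' ++ done) := by
        have htail : (rest' ++ done).filter (fun p => !(p.1 == k)) = rest' ++ done :=
          List.filter_eq_self.mpr (fun p hp => by simp [hfreshk p hp])
        simp only [PySem.Dict.erase, PySem.Dict.items, List.filter_cons]
        simp [htail]
      have hpop : (PySem.Dict.mk (((k, v) :: rest') ++ done)).pop? k =
          some (v, PySem.Dict.mk (rest' ++ done)) := by
        rw [List.cons_append]
        simp [PySem.Dict.pop?, hget, herase]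
      rw [List.map_cons, List.foldl_cons]
      have hdone_weak : ∀ x ∈ done.map Prod.fst,
          (x ∈ K₀ ∧ x ∉ rest'.map Prod.fst) ∨
          (∃ k0 c, k0 ∈ K₀ ∧ k0 ∉ rest'.map Prod.fst ∧ k0.toList.length = L ∧ x = pvPush k0 c) := by
        intro x hx
        rcases h4 x hx with ⟨ha, hb⟩ | ⟨k0, c, ha, hb, hc, hd⟩
        · exact Or.inl ⟨ha, fun hm => hb (by simp [hm])⟩
        · exact Or.inr ⟨k0, c, ha, fun hm => hb (by simp [hm]), hc, hd⟩
      by_cases hlen : v.length < 2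
      · -- singleton: reinsert
        have hbody : ltoBody (PySem.Dict.mk (((k, v) :: rest') ++ done)) k =
            PySem.Dict.mk (rest' ++ (done ++ [(k, v)])) := by
          simp only [ltoBody, hpop]
          rw [if_pos hlen, pv_insert_fresh _ k v hfreshk, List.append_assoc]
        rw [hbody]
        rw [ih (done ++ [(k, v)])
          h1'.2
          (fun p hp => h2 p (by simp [hp]))
          (fun p hp => h3 p (by simp [hp]))
          ?_]
        · simp [pvStepL, hlen, List.append_assoc]
        · intro x hx
          rw [List.map_append] at hx
          rcases List.mem_append.mp hx with h | h
          · exact hdone_weak x h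
          · simp at h
            subst h
            exact Or.inl ⟨hk0, hknr⟩
      · -- split the group
        have h2v : 2 ≤ v.length := by omega
        have hkLe : k.toList.length = L := h3 (k, v) (by simp) h2v
        have hfresh : ∀ s ∈ v, ∀ p ∈ rest' ++ done, p.1 ≠ pvKey k s := by
          intro s hs p hp
          cases hsl : s.toList with
          | nil =>
              simp only [pvKey, hsl]
              exact hfreshk p hp
          | cons c t =>
              simp only [pvKey, hsl]
              intro he
              rcases List.mem_append.mp hp with hpr | hpd
              · have : p.1.toList.length ≤ L := hK p.1 (h2 p (by simp [hpr]))
                exact pvPush_ne_short k p.1 c (by omega) he.symm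
              · rcases h4 p.1 (List.mem_map_of_mem hpd) with ⟨hin, _⟩ | ⟨k0, c0, hk0K, hk0nr, hk0L, hpe⟩
                · have : p.1.toList.length ≤ L := hK p.1 hin
                  exact pvPush_ne_short k p.1 c (by omega) he.symm
                · rw [hpe] at he
                  have hinj := pvPush_inj k0 k c0 c (by omega) he
                  exact hk0nr (by rw [hinj.1]; simp)
        have hbody : ltoBody (PySem.Dict.mk (((k, v) :: rest') ++ done)) k =
            PySem.Dict.mk (rest' ++ (done ++ (ltoGroups k v).items)) := by
          simp only [ltoBody, hpop]
          rw [if_neg hlen, ltoStep_foldl_eq]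
          have hsplit : rest' ++ done = (rest' ++ done) ++ [] := by simp
          rw [show (PySem.Dict.mk (rest' ++ done)) = (PySem.Dict.mk ((rest' ++ done) ++ [])) by simp]
          rw [pv_gfold_append v (rest' ++ done) [] k hfresh]
          rw [List.append_assoc]
          rfl
        rw [hbody]
        rw [ih (done ++ (ltoGroups k v).items)
          h1'.2
          (fun p hp => h2 p (by simp [hp]))
          (fun p hp => h3 p (by simp [hp]))
          ?_]
        · simp [pvStepL, hlen, List.append_assoc]
        · intro x hx
          rw [List.map_append] at hx
          rcases List.mem_append.mp hx with h | h
          · exact hdone_weak x h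
          · -- x is a key of the new groups
            have hxk : x ∈ (ltoGroups k v).keys := by
              rw [pv_keys_eq]; exact h
            rw [ltoGroups, pv_mem_keys_gfold] at hxk
            rcases hxk with h0 | hmem
            · rw [PySem.Dict.keys_empty] at h0; simp at h0
            · obtain ⟨s0, _, hs0⟩ := List.mem_map.mp hmem
              cases hsl : s0.toList with
              | nil =>
                  have : x = k := by rw [← hs0]; simp [pvKey, hsl]
                  subst this
                  exact Or.inl ⟨hk0, hknr⟩
              | cons c t =>
                  have : x = pvPush k c := by rw [← hs0]; simp [pvKey, hsl]
                  exact Or.inr ⟨k, c, hk0, hknr, hkLe, this⟩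

theorem pv_round_eq (d : pvD) (L : Nat) (h : pvInv d L) :
    ltoRound d = PySem.Dict.mk (d.items.flatMap pvStepL) := by
  obtain ⟨hnd, hval, hle, heq⟩ := h
  have hmain := pv_round_go L (d.items.map Prod.fst)
    (by
      intro x hx
      obtain ⟨p, hp, rfl⟩ := List.mem_map.mp hx
      exact hle p hp)
    d.items []
    (by rw [← pv_keys_eq]; exact hnd)
    (fun p hp => List.mem_map_of_mem hp)
    heq
    (by simp)
  rw [List.append_nil] at hmain
  rw [List.nil_append] at hmain
  show d.keys.foldl ltoBody d = _
  rw [pv_keys_eq]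
  exact hmain

theorem pv_inv_round (d : pvD) (L : Nat) (h : pvInv d L) : pvInv (ltoRound d) (L+1) := by
  obtain ⟨hnd, hval, hle, heq⟩ := h
  rw [pv_round_eq d L ⟨hnd, hval, hle, heq⟩]
  have hshape : ∀ p ∈ d.items, ∀ q ∈ pvStepL p,
      q.1 = p.1 ∨ (∃ c, q.1 = pvPush p.1 c ∧ p.1.toList.length = L) := by
    intro p hp q hq
    rcases pv_stepL_cases p q hq with ⟨hqe, _⟩ | ⟨h2, ⟨he, _⟩ | ⟨c, he, _, _⟩⟩
    · exact Or.inl (by rw [hqe])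
    · exact Or.inl he
    · exact Or.inr ⟨c, he, heq p hp h2⟩
  refine ⟨?_, ?_, ?_, ?_⟩
  · -- keys nodup
    rw [pv_keys_eq]
    show ((d.items.flatMap pvStepL).map Prod.fst).Nodup
    rw [List.map_flatMap]
    apply List.nodup_flatMap.mpr
    refine ⟨?_, ?_⟩
    · intro p _
      unfold pvStepL
      split
      · simp
      · rw [← pv_keys_eq]
        exact pv_nodup_keys_gfold p.1 p.2 PySem.Dict.empty PySem.Dict.nodup_keys_empty
    · have hpw : List.Pairwise (fun p q : String × List String => p.1 ≠ q.1) d.items := by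
        have : (d.items.map Prod.fst).Nodup := by rw [← pv_keys_eq]; exact hnd
        exact List.pairwise_map.mp this
      refine List.Pairwise.imp_of_mem ?_ hpw
      intro p q hp hq hne
      intro x hx1 hx2
      obtain ⟨q1, hq1, hq1e⟩ := List.mem_map.mp hx1
      obtain ⟨q2, hq2, hq2e⟩ := List.mem_map.mp hx2
      have he : q1.1 = q2.1 := by rw [hq1e, hq2e]
      have hpl : p.1.toList.length ≤ L := hle p hp
      have hql : q.1.toList.length ≤ L := hle q hq
      rcases hshape p hp q1 hq1 with ha | ⟨c1, ha, haL⟩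
      · rcases hshape q hq q2 hq2 with hb | ⟨c2, hb, _⟩
        · exact hne (by rw [← ha, ← hb, he])
        · rw [ha, hb] at he
          have := congrArg (fun s => s.toList.length) he
          simp only [pvPush_len] at this
          omega
      · rcases hshape q hq q2 hq2 with hb | ⟨c2, hb, hbL⟩
        · rw [ha, hb] at he
          have := congrArg (fun s => s.toList.length) he
          simp only [pvPush_len] at this
          omega
        · rw [ha, hb] at he
          have := pvPush_inj p.1 q.1 c1 c2 (by omega) he
          exact hne this.1
  · -- values nodup
    intro q hq
    have hq' : q ∈ d.items.flatMap pvStepL := hq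
    obtain ⟨p, hp, hqp⟩ := List.mem_flatMap.mp hq'
    rcases pv_stepL_cases p q hqp with ⟨hqe, _⟩ | ⟨h2, ⟨_, he⟩ | ⟨c, _, he, _⟩⟩
    · rw [hqe]; exact hval p hp
    · rw [he]; simp
    · rw [he]
      apply List.Nodup.map_on
      · intro a ha b hb hab
        have ha' := (List.mem_filter.mp ha).2
        have hb' := (List.mem_filter.mp hb).2
        exact pvTail_inj_on a b c (by simpa using ha') (by simpa using hb') hab
      · exact List.Nodup.filter _ (hval p hp)
  · -- key lengths
    intro q hq
    obtain ⟨p, hp, hqp⟩ := List.mem_flatMap.mp hq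
    rcases hshape p hp q hqp with he | ⟨c, he, heL⟩
    · rw [he]; have := hle p hp; omega
    · rw [he, pvPush_len]; omega
  · -- long entries sit at level L+1
    intro q hq h2q
    obtain ⟨p, hp, hqp⟩ := List.mem_flatMap.mp hq
    rcases pv_stepL_cases p q hqp with ⟨hqe, hsmall⟩ | ⟨h2, ⟨_, he⟩ | ⟨c, he, _, _⟩⟩
    · rw [hqe] at h2q; omega
    · rw [he] at h2q; simp at h2q
    · rw [he, pvPush_len, heq p hp h2]

theorem pv_wd_round_lt (d : pvD) (L : Nat) (h : pvInv d L)
    (hc : d.values.any (fun v => decide (1 < v.length)) = true) :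
    pvWD (ltoRound d).items < pvWD d.items := by
  obtain ⟨hnd, hval, hle, heq⟩ := h
  rw [pv_round_eq d L ⟨hnd, hval, hle, heq⟩]
  show pvWD (d.items.flatMap pvStepL) < pvWD d.items
  rw [pvWD_flatMap]
  have hstrict : ∃ p ∈ d.items, 2 ≤ p.2.length := by
    obtain ⟨v0, hv0, hd0⟩ := List.any_eq_true.mp hc
    obtain ⟨p, hp, hpe⟩ := List.mem_map.mp hv0
    refine ⟨p, hp, ?_⟩
    have h2 : p.2 = v0 := hpe
    rw [h2]
    have := of_decide_eq_true hd0
    omega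
  have hle' : ∀ p ∈ d.items, pvWD (pvStepL p) ≤ (p.2.map pvW).sum := by
    intro p hp
    unfold pvStepL
    split
    · rw [pvWD_cons]; simp [pvWD]
    · calc pvWD (ltoGroups p.1 p.2).items ≤ pvWD (PySem.Dict.empty : pvD).items + (p.2.map pvWI).sum :=
            pv_wd_gfold_le p.1 p.2 PySem.Dict.empty PySem.Dict.nodup_keys_empty
        _ = (p.2.map pvWI).sum := by simp [pvWD, PySem.Dict.empty]
        _ ≤ (p.2.map pvW).sum := List.sum_le_sum (fun s _ => pvWI_le s)
  apply List.sum_lt_sum _ _ hle'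
  obtain ⟨p, hp, h2⟩ := hstrict
  refine ⟨p, hp, ?_⟩
  unfold pvStepL
  rw [if_neg (by omega)]
  calc pvWD (ltoGroups p.1 p.2).items ≤ (p.2.map pvWI).sum := by
        have := pv_wd_gfold_le p.1 p.2 PySem.Dict.empty PySem.Dict.nodup_keys_empty
        simpa [pvWD, PySem.Dict.empty] using this
    _ < (p.2.map pvW).sum := pv_wI_lt p.2 (hval p hp) h2

-- ---- fuel does not matter once it is large enough ----
theorem pv_EL_congr : ∀ (n m : Nat) (p : String × List String),
    (p.2.map pvW).sum < n → (p.2.map pvW).sum < m → pvEL n p = pvEL m p := by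
  intro n
  induction n with
  | zero => intro m p hn _; omega
  | succ n ih =>
      intro m p hn hm
      cases m with
      | zero => omega
      | succ m' =>
          simp only [pvEL]
          by_cases hl : p.2.length < 2
          · rw [if_pos hl, if_pos hl]
          · rw [if_neg hl, if_neg hl]
            apply pv_flatMap_congr
            intro q hq
            have hlt := pv_group_w_lt p.1 p.2 q (by omega) hq
            exact ih m' q (by omega) (by omega)

theorem pv_loop_items : ∀ (n : Nat) (d : pvD) (L : Nat), pvInv d L → pvWD d.items < n →
    (ltoLoop n d).items = d.items.flatMap (fun p => pvEL ((p.2.map pvW).sum + 1) p) := by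
  intro n
  induction n with
  | zero => intro d L _ hwd; omega
  | succ n ih =>
      intro d L h hwd
      simp only [ltoLoop]
      by_cases hc : d.values.any (fun v => decide (1 < v.length)) = true
      · rw [if_pos hc]
        have hlt := pv_wd_round_lt d L h hc
        rw [ih (ltoRound d) (L+1) (pv_inv_round d L h) (by omega)]
        rw [pv_round_eq d L h]
        show (d.items.flatMap pvStepL).flatMap _ = _
        rw [List.flatMap_assoc]
        apply pv_flatMap_congr
        intro p hp
        by_cases hl : p.2.length < 2
        · unfold pvStepL
          rw [if_pos hl, List.flatMap_singleton]
        · unfold pvStepL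
          rw [if_neg hl]
          have : pvEL ((p.2.map pvW).sum + 1) p =
              (ltoGroups p.1 p.2).items.flatMap (pvEL ((p.2.map pvW).sum)) := by
            simp only [pvEL]
            rw [if_neg hl]
          rw [this]
          apply pv_flatMap_congr
          intro q hq
          exact pv_EL_congr ((q.2.map pvW).sum + 1) ((p.2.map pvW).sum) q (by omega)
            (pv_group_w_lt p.1 p.2 q (by omega) hq)
      · rw [if_neg hc]
        have hcf : d.values.any (fun v => decide (1 < v.length)) = false := by
          cases hb : d.values.any (fun v => decide (1 < v.length)) with
          | false => rfl
          | true => exact absurd hb hc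
        have hall : ∀ p ∈ d.items, p.2.length < 2 := by
          intro p hp
          have hv : p.2 ∈ d.values := by
            rw [show d.values = d.items.map (fun x => x.2) from rfl]
            exact List.mem_map_of_mem hp
          have h5 := List.any_eq_false.mp hcf p.2 hv
          simp only [decide_eq_true_eq] at h5
          omega
        have hcongr : d.items.flatMap (fun p => pvEL ((p.2.map pvW).sum + 1) p) =
            d.items.flatMap (fun p => [p]) := by
          apply pv_flatMap_congr
          intro p hp
          simp only [pvEL]
          rw [if_pos (hall p hp)]
        rw [hcongr, List.flatMap_singleton']

-- ---- Source B's expand is the leaf extraction of the expansion ----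
theorem pv_expand_filterMap : ∀ (n : Nat) (k : String) (v : List String),
    ltoExpand n k v = (pvEL n (k, v)).filterMap pvExt := by
  intro n
  induction n with
  | zero => intro k v; rfl
  | succ n ih =>
      intro k v
      simp only [ltoExpand, pvEL]
      by_cases hl : v.length < 2
      · rw [if_pos hl, if_pos hl]
        match v, hl with
        | [], _ => rfl
        | [s], _ => rfl
      · rw [if_neg hl, if_neg hl]
        rw [List.filterMap_flatMap]
        apply pv_flatMap_congr
        intro q _
        simpa using ih q.1 q.2

-- ---- keys of the expansion: pairwise distinct, each extending the root ----
theorem pv_EL_marker (n : Nat) (k : String) : ∀ q ∈ pvEL n (k, [""]), q = (k, [""]) := by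
  cases n <;> simp [pvEL]

theorem pv_EL_shape : ∀ (n : Nat) (p : String × List String),
    ((pvEL n p).map Prod.fst).Nodup ∧ (∀ q ∈ pvEL n p, p.1.toList <+: q.1.toList) := by
  intro n
  induction n with
  | zero => intro p; simp [pvEL]
  | succ n ih =>
      intro p
      by_cases hl : p.2.length < 2
      · constructor
        · simp [pvEL, hl]
        · intro q hq
          simp only [pvEL, if_pos hl] at hq
          simp only [List.mem_singleton] at hq
          rw [hq]
      · have hgnd : ((ltoGroups p.1 p.2).items.map Prod.fst).Nodup := by
          rw [← pv_keys_eq]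
          exact pv_nodup_keys_gfold p.1 p.2 PySem.Dict.empty PySem.Dict.nodup_keys_empty
        constructor
        · simp only [pvEL, if_neg hl]
          rw [List.map_flatMap]
          apply List.nodup_flatMap.mpr
          refine ⟨fun q _ => (ih q).1, ?_⟩
          have hpw : List.Pairwise (fun a b : String × List String => a.1 ≠ b.1)
              (ltoGroups p.1 p.2).items := List.pairwise_map.mp hgnd
          refine List.Pairwise.imp_of_mem ?_ hpw
          intro q1 q2 hq1 hq2 hne
          intro x hx1 hx2
          obtain ⟨r1, hr1, hr1e⟩ := List.mem_map.mp hx1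
          obtain ⟨r2, hr2, hr2e⟩ := List.mem_map.mp hx2
          have hpre1 : q1.1.toList <+: x.toList := hr1e ▸ (ih q1).2 r1 hr1
          have hpre2 : q2.1.toList <+: x.toList := hr2e ▸ (ih q2).2 r2 hr2
          rcases pv_mem_groups p.1 p.2 q1 hq1 with ⟨hk1, hv1⟩ | ⟨c1, hk1, _, _⟩
          · -- q1 is the marker: its expansion is itself
            have : r1 = (q1.1, [""]) := by
              have := pv_EL_marker n q1.1 r1
              rw [show ((q1.1 : String), ([""] : List String)) = q1 from by
                cases q1; simp_all] at this
              have h2 := this hr1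
              rw [h2]
              cases q1; simp_all
            have hx : x = q1.1 := by rw [← hr1e, this]
            rcases pv_mem_groups p.1 p.2 q2 hq2 with ⟨hk2, _⟩ | ⟨c2, hk2, _, _⟩
            · exact hne (by rw [hk1, hk2])
            · -- x = q1.1 = p.1 but x extends pvPush p.1 c2
              have hlen2 := hpre2.length_le
              rw [hk2, pvPush_len] at hlen2
              rw [hx, hk1] at *
              have : p.1.toList.length + 1 ≤ p.1.toList.length := by
                simpa using hlen2
              omega
          · rcases pv_mem_groups p.1 p.2 q2 hq2 with ⟨hk2, _⟩ | ⟨c2, hk2, _, _⟩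
            · -- symmetric marker case for q2
              have : r2 = (q2.1, [""]) := by
                have := pv_EL_marker n q2.1 r2
                rw [show ((q2.1 : String), ([""] : List String)) = q2 from by
                  cases q2; simp_all] at this
                have h2 := this hr2
                rw [h2]
                cases q2; simp_all
              have hx : x = q2.1 := by rw [← hr2e, this]
              have hlen1 := hpre1.length_le
              rw [hk1, pvPush_len] at hlen1
              rw [hx, hk2] at *
              have : p.1.toList.length + 1 ≤ p.1.toList.length := by
                simpa using hlen1
              omega
            · -- both genuine children: same-length prefixes must agree
              obtain ⟨t1, ht1⟩ := hpre1
              obtain ⟨t2, ht2⟩ := hpre2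
              have hkeq : q1.1.toList = q2.1.toList := by
                have hl1 : q1.1.toList.length = q2.1.toList.length := by
                  rw [hk1, hk2, pvPush_len, pvPush_len]
                exact (List.append_inj (ht1.trans ht2.symm) hl1).1
              exact hne (String.toList_inj.mp hkeq)
        · intro q hq
          simp only [pvEL, if_neg hl] at hq
          obtain ⟨g, hg, hqg⟩ := List.mem_flatMap.mp hq
          have hpre := (ih g).2 q hqg
          rcases pv_mem_groups p.1 p.2 g hg with ⟨hk, _⟩ | ⟨c, hk, _, _⟩
          · rw [hk] at hpre; exact hpre
          · refine List.IsPrefix.trans ?_ hpre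
            rw [hk, pvPush_toList]
            exact ⟨[c], rfl⟩

-- ---- final extraction ----
theorem pv_ext_keys_sublist : ∀ (ll : List (String × List String)),
    ((ll.filterMap pvExt).map Prod.fst).Sublist (ll.map Prod.fst) := by
  intro ll
  induction ll with
  | nil => simp
  | cons p t ih =>
      obtain ⟨p1, p2⟩ := p
      cases p2 with
      | nil =>
          simp only [List.filterMap_cons, pvExt, List.map_cons]
          exact ih.cons p1
      | cons s r =>
          simp only [List.filterMap_cons, pvExt, List.map_cons]
          exact ih.cons₂ p1

theorem pv_rfold (ll : List (String × List String)) (r : PySem.Dict String String)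
    (hnd : ((ll.filterMap pvExt).map Prod.fst).Nodup)
    (hfr : ∀ q ∈ ll.filterMap pvExt, r.contains q.1 = false) :
    (ll.foldl (fun r p => match p.2 with | [] => r | s :: _ => r.insert p.1 s) r).items =
      r.items ++ ll.filterMap pvExt := by
  induction ll generalizing r with
  | nil => simp
  | cons p t ih =>
      obtain ⟨p1, p2⟩ := p
      cases p2 with
      | nil =>
          have hstep : List.filterMap pvExt ((p1, ([] : List String)) :: t) =
              List.filterMap pvExt t := by
            simp [List.filterMap_cons, pvExt]
          rw [hstep] at hnd hfr
          simp only [List.foldl_cons]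
          rw [ih r hnd hfr, hstep]
      | cons s rest =>
          have hstep : List.filterMap pvExt ((p1, s :: rest) :: t) =
              (p1, s) :: List.filterMap pvExt t := by
            simp [List.filterMap_cons, pvExt]
          rw [hstep] at hnd hfr
          have hnd2 := List.nodup_cons.mp (by simpa only [List.map_cons] using hnd)
          have hfr1 : r.contains p1 = false := hfr (p1, s) (by simp)
          have hins : (r.insert p1 s).items = r.items ++ [(p1, s)] := by
            simp [PySem.Dict.insert, hfr1]
          simp only [List.foldl_cons]
          rw [ih (r.insert p1 s) hnd2.2 ?_, hstep, hins]
          · simp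
          · intro q hq
            have hq1 : q.1 ≠ p1 := by
              intro he
              exact hnd2.1 (he ▸ List.mem_map_of_mem hq)
            rw [PySem.Dict.contains_insert]
            simp only [Bool.or_eq_false_iff]
            exact ⟨by simp [hq1], hfr q (by simp [hq])⟩

theorem pv_ofList_items (bl : List (String × String)) (hnd : (bl.map Prod.fst).Nodup) :
    (PySem.Dict.ofList bl).items = bl := by
  show (PySem.Dict.empty.update bl).items = bl
  have h1 : ∀ a ∈ bl, (PySem.Dict.empty : PySem.Dict String String).contains a.1 = false :=
    fun a _ => PySem.Dict.contains_empty a.1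
  have := PySem.Dict.items_foldl_insert_fresh bl Prod.fst Prod.snd PySem.Dict.empty h1 hnd
  simpa using this

theorem pv_inv_init (xs : List String) :
    pvInv (PySem.Dict.empty.insert "" (PySem.Set.ofList xs)) 0 := by
  have hitems : (PySem.Dict.empty.insert "" (PySem.Set.ofList xs) : pvD).items =
      [("", PySem.Set.ofList xs)] := by
    simp [PySem.Dict.insert, PySem.Dict.contains, PySem.Dict.empty]
  refine ⟨?_, ?_, ?_, ?_⟩
  · rw [pv_keys_eq, hitems]; simp
  · intro p hp
    rw [hitems] at hp
    simp only [List.mem_singleton] at hp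
    rw [hp]
    exact PySem.Set.nodup_ofList xs
  · intro p hp
    rw [hitems] at hp
    simp only [List.mem_singleton] at hp
    rw [hp]
    simp
  · intro p hp _
    rw [hitems] at hp
    simp only [List.mem_singleton] at hp
    rw [hp]
    simp

theorem lto_main (strings : List String) : lto_dict strings = lto_dict_alt strings := by
  have hded : PySem.List.dedup strings = PySem.Set.ofList strings := rfl
  have hd0 : (PySem.Dict.empty.insert "" (PySem.Set.ofList strings) : pvD).items =
      [("", PySem.Set.ofList strings)] := by
    simp [PySem.Dict.insert, PySem.Dict.contains, PySem.Dict.empty]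
  have hloop := pv_loop_items
    (pvWD (PySem.Dict.empty.insert "" (PySem.Set.ofList strings) : pvD).items + 1)
    (PySem.Dict.empty.insert "" (PySem.Set.ofList strings)) 0 (pv_inv_init strings) (by omega)
  rw [hd0] at hloop
  have hflat : ([(("" : String), (PySem.Set.ofList strings : List String))]).flatMap
      (fun p => pvEL ((p.2.map pvW).sum + 1) p) =
      pvEL (((PySem.Set.ofList strings : List String).map pvW).sum + 1)
        ("", PySem.Set.ofList strings) := by
    simp
  rw [hflat] at hloop
  have hshape := pv_EL_shape (((PySem.Set.ofList strings : List String).map pvW).sum + 1)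
    ("", PySem.Set.ofList strings)
  have hndE : (((pvEL (((PySem.Set.ofList strings : List String).map pvW).sum + 1)
      ("", PySem.Set.ofList strings)).filterMap pvExt).map Prod.fst).Nodup :=
    List.Nodup.sublist (pv_ext_keys_sublist _) hshape.1
  show (((ltoLoop (pvWD (PySem.Dict.empty.insert "" (PySem.Set.ofList strings) : pvD).items + 1)
      (PySem.Dict.empty.insert "" (PySem.Set.ofList strings))).items).foldl
      (fun r p => match p.2 with | [] => r | s :: _ => r.insert p.1 s)
      (PySem.Dict.empty : PySem.Dict String String)).items = lto_dict_alt strings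
  rw [hd0, hloop]
  rw [pv_rfold _ PySem.Dict.empty hndE (fun q _ => PySem.Dict.contains_empty q.1)]
  show PySem.Dict.empty.items ++ _ = (PySem.Dict.ofList
      (ltoExpand (((PySem.List.dedup strings).map pvW).sum + 1) "" (PySem.List.dedup strings))).items
  rw [hded, pv_expand_filterMap, pv_ofList_items _ hndE]
  simp [PySem.Dict.empty]

-- ===== VERDICT (by name: the statement is the Claim_ definition above) =====
theorem lto_dict_spec : Claim_equal_lto_dict := by
  intro strings _
  unfold Spec_lto_dict
  exact lto_main strings
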